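-- pv_equiv track=rewrite | github.com/Doktorkrab/code | botat/region2014_32/stress_b.py | solution
-- ===== SOURCE A (Python) =====
-- def solution(a, k, b, m, x):
--     ans = 0
--     for i in range(1, 1000):
--         ans += 1
--         if i % k:
--             x -= a
--         if i % m:
--             x -= b
--         if x <= 0:
--             break
--     return ans
-- ===== SOURCE B (Python) =====
-- def solution(a, k, b, m, x):
--     kk, mm = abs(k), abs(m)
--     for i in range(1, 1000):
--         drop = a * (i - i // kk) + b * (i - i // mm)
--         if x - drop <= 0:
--             return i
--     return 999
-- ===== Notes on version B (the rewrite author's own statement) =====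
-- stated objective: alternative
-- what changed: B replaces A's running accumulator on x (stepwise subtraction with break) by a per-step closed-form cumulative drop a*(i - i//|k|) + b*(i - i//|m|), returning the first i where the initial x minus that drop is <= 0.
import Mathlib
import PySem

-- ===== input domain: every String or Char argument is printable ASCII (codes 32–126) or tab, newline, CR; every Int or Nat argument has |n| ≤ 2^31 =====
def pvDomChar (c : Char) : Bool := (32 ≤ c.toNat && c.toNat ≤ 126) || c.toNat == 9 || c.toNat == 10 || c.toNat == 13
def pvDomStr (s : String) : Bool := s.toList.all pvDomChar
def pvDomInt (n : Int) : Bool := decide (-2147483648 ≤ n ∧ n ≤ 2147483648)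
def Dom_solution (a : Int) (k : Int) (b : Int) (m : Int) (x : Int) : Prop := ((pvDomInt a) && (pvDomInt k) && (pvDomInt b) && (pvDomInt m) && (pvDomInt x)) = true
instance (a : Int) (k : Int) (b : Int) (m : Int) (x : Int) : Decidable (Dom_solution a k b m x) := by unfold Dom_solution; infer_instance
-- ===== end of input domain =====

-- B replaces A's running accumulator on x by a per-step closed-form cumulative drop; same value, same cost (objective: alternative).

-- ===== PORT A =====
-- the 'for i in range(1, 1000): … break' loop of A, as fuel recursion (fuel = remaining iterations)
def solGoA (a : Int) (k : Int) (b : Int) (m : Int) (i : Int) (fuel : Nat) (ans : Int) (x : Int) : Int :=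
  match fuel with
  | 0 => ans
  | Nat.succ f =>
    let ans' := ans + 1
    let x1 := if PySem.Int.mod i k ≠ 0 then x - a else x
    let x2 := if PySem.Int.mod i m ≠ 0 then x1 - b else x1
    if x2 ≤ 0 then ans' else solGoA a k b m (i + 1) f ans' x2

def solution (a : Int) (k : Int) (b : Int) (m : Int) (x : Int) : Int :=
  solGoA a k b m 1 999 0 x

-- ===== PORT B =====
def solDrop (a : Int) (kk : Int) (b : Int) (mm : Int) (i : Int) : Int :=
  a * (i - PySem.Int.floordiv i kk) + b * (i - PySem.Int.floordiv i mm)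

def solGoB (a : Int) (kk : Int) (b : Int) (mm : Int) (x : Int) (i : Int) (fuel : Nat) : Int :=
  match fuel with
  | 0 => 999
  | Nat.succ f =>
    if x - solDrop a kk b mm i ≤ 0 then i else solGoB a kk b mm x (i + 1) f

def solution_alt (a : Int) (k : Int) (b : Int) (m : Int) (x : Int) : Int :=
  solGoB a |k| b |m| x 1 999

-- ===== PRECONDITION & SPEC =====
-- Pre_ excludes k = 0 or m = 0, on which Python A raises ZeroDivisionError (i % k at i = 1).
def Pre_solution (a : Int) (k : Int) (b : Int) (m : Int) (x : Int) : Prop := k ≠ 0 ∧ m ≠ 0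
instance (a : Int) (k : Int) (b : Int) (m : Int) (x : Int) : Decidable (Pre_solution a k b m x) := by unfold Pre_solution; infer_instance
def pvWitness_solution : Int × Int × Int × Int × Int := (1, 2, 1, 3, 10)

def Spec_solution (a : Int) (k : Int) (b : Int) (m : Int) (x : Int) (out : Int) : Prop := out = solution_alt a k b m x
instance (a : Int) (k : Int) (b : Int) (m : Int) (x : Int) (out : Int) : Decidable (Spec_solution a k b m x out) := by unfold Spec_solution; infer_instance

-- ===== CLAIM (what is proved, stated in full; the proofs are below) =====
def Claim_equal_solution : Prop := ∀ (a : Int) (k : Int) (b : Int) (m : Int) (x : Int), Dom_solution a k b m x → Pre_solution a k b m x → Spec_solution a k b m x (solution a k b m x)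

-- ===== LEMMAS AND PROOFS =====

-- one step of integer division by a positive K: the quotient grows by 1 exactly at multiples of K
lemma solEdivStep (K i : Int) (hK : 0 < K) :
    i / K - (i - 1) / K = if K ∣ i then 1 else 0 := by
  have h := Int.ediv_add_emod i K
  set q := i / K with hq
  set r := i % K with hr
  have hr0 : 0 ≤ r := Int.emod_nonneg i (by omega)
  have hrK : r < K := Int.emod_lt_of_pos i hK
  by_cases hd : K ∣ i
  · have hre : r = 0 := hr ▸ Int.emod_eq_zero_of_dvd hd
    have h3 : (i - 1) / K = q - 1 := by
      have h2 : i - 1 = (K - 1) + (q - 1) * K := by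
        rw [hre] at h; linear_combination -h
      rw [h2, Int.add_mul_ediv_right _ _ (show K ≠ 0 by omega),
          Int.ediv_eq_zero_of_lt (by omega) (by omega), zero_add]
    rw [h3]; simp [hd]
  · have hre : r ≠ 0 := fun h0 => hd (Int.dvd_of_emod_eq_zero (hr ▸ h0))
    have h3 : (i - 1) / K = q := by
      have h2 : i - 1 = (r - 1) + q * K := by linear_combination -h
      rw [h2, Int.add_mul_ediv_right _ _ (show K ≠ 0 by omega),
          Int.ediv_eq_zero_of_lt (by omega) (by omega), zero_add]
    rw [h3]; simp [hd]

-- per-divisor step of the closed-form non-divisible count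
lemma solCountStep (k i : Int) (hk : k ≠ 0) :
    (i - PySem.Int.floordiv i |k|) - ((i - 1) - PySem.Int.floordiv (i - 1) |k|)
      = if PySem.Int.mod i k ≠ 0 then 1 else 0 := by
  have hK : 0 < |k| := abs_pos.mpr hk
  rw [PySem.Int.floordiv_eq_ediv_of_pos hK, PySem.Int.floordiv_eq_ediv_of_pos hK]
  have hstep := solEdivStep |k| i hK
  have hmod : PySem.Int.mod i k = 0 ↔ |k| ∣ i := by
    rw [PySem.Int.mod_eq_zero_iff_dvd]; exact ((abs_dvd _ _).symm)
  by_cases hd : |k| ∣ i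
  · have : PySem.Int.mod i k = 0 := hmod.mpr hd
    simp [hd, this] at hstep ⊢; omega
  · have : PySem.Int.mod i k ≠ 0 := fun h0 => hd (hmod.mp h0)
    simp [hd, this] at hstep ⊢; omega

-- the stepwise state of A equals the initial x minus the closed-form drop
lemma solDropStep (a k b m i : Int) (hk : k ≠ 0) (hm : m ≠ 0) (x0 : Int) :
    (let x := x0 - solDrop a |k| b |m| (i - 1)
     let x1 := if PySem.Int.mod i k ≠ 0 then x - a else x
     if PySem.Int.mod i m ≠ 0 then x1 - b else x1)
      = x0 - solDrop a |k| b |m| i := by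
  have h1 := solCountStep k i hk
  have h2 := solCountStep m i hm
  simp only [solDrop] at *
  by_cases c1 : PySem.Int.mod i k ≠ 0 <;> by_cases c2 : PySem.Int.mod i m ≠ 0 <;>
    simp [c1, c2] at h1 h2 ⊢ <;>
    first
      | linear_combination a * h1 + b * h2
      | linear_combination (-2*a) * h1 + (-2*b) * h2
      | linear_combination (-a) * h1 + (-b) * h2

-- loop invariant: entering iteration i, ans = i - 1 and x = x0 - drop(i-1)
lemma solMain (a k b m : Int) (hk : k ≠ 0) (hm : m ≠ 0) :
    ∀ (f : Nat) (i x0 : Int), i = 1000 - (f : Int) → 1 ≤ i →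
      solGoA a k b m i f (i - 1) (x0 - solDrop a |k| b |m| (i - 1))
        = solGoB a |k| b |m| x0 i f := by
  intro f
  induction f with
  | zero => intro i x0 hi _; simp [solGoA, solGoB]; omega
  | succ f ih =>
    intro i x0 hi hi1
    have hx2 := solDropStep a k b m i hk hm x0
    simp only [solGoA, solGoB]
    simp only at hx2
    rw [hx2]
    split_ifs with h
    · omega
    · have h1 : i - 1 + 1 = (i + 1) - 1 := by omega
      have h2 : x0 - solDrop a |k| b |m| i = x0 - solDrop a |k| b |m| ((i + 1) - 1) := by
        norm_num
      rw [h1, h2]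
      exact ih (i + 1) x0 (by push_cast at hi ⊢; omega) (by omega)

-- ===== VERDICT (by name: the statement is the Claim_ definition above) =====
theorem solution_spec : Claim_equal_solution := by
  intro a k b m x _ hpre
  obtain ⟨hk, hm⟩ := hpre
  unfold Spec_solution solution solution_alt
  have h0 : solDrop a |k| b |m| ((1 : Int) - 1) = 0 := by
    have hK : 0 < |k| := abs_pos.mpr hk
    have hM : 0 < |m| := abs_pos.mpr hm
    simp [solDrop, PySem.Int.floordiv_eq_ediv_of_pos hK, PySem.Int.floordiv_eq_ediv_of_pos hM]
  have := solMain a k b m hk hm 999 1 x (by norm_num) (by norm_num)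
  rw [h0] at this
  simpa using this
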